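-- pv_equiv track=rewrite | github.com/MrBrantCode/unitest_baseline | mut_generate/mist_train_cf/cf_93863/solution.py | update_array
-- ===== SOURCE A (Python) =====
-- def update_array(arr, num):
--     updated_arr = []
--     for element in arr:
--         if element % 2 == 0:
--             updated_arr.append(element + num)
--         else:
--             updated_arr.append(element)
--
--     updated_arr = list(set(updated_arr)) # remove duplicates
--     updated_arr.sort() # sort in ascending order
--
--     return updated_arr
-- ===== SOURCE B (Python) =====
-- def update_array(arr, num):
--     def merge(a, b):
--         # merge two sorted duplicate-free lists into one, collapsing duplicates
--         i, j, r = 0, 0, []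
--         while i < len(a) and j < len(b):
--             if a[i] < b[j]:
--                 r.append(a[i]); i += 1
--             elif b[j] < a[i]:
--                 r.append(b[j]); j += 1
--             else:
--                 r.append(a[i]); i += 1; j += 1
--         r.extend(a[i:])
--         r.extend(b[j:])
--         return r
--
--     def msort(l):
--         if len(l) <= 1:
--             return l
--         m = len(l) // 2
--         return merge(msort(l[:m]), msort(l[m:]))
--
--     return msort([x + num if x % 2 == 0 else x for x in arr])
-- ===== Notes on version B (the rewrite author's own statement) =====
-- stated objective: alternative
-- what changed: Replaces A's staged map + hash-set dedup + library sort with a hand-written recursive merge sort whose two-pointer merge step collapses duplicates while merging (no set, no sort call).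
import Mathlib
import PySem

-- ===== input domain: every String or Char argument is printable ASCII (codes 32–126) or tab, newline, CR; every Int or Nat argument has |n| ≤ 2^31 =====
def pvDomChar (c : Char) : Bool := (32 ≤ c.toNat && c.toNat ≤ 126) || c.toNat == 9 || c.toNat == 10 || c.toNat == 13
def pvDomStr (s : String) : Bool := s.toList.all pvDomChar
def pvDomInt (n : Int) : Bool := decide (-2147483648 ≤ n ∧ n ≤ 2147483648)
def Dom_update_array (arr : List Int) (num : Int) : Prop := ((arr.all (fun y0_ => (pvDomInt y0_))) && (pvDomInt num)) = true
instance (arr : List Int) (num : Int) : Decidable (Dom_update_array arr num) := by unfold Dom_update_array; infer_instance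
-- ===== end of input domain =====

-- B replaces A's staged map + hash-set dedup + sort with a recursive merge sort whose
-- merge step collapses duplicates as it goes (objective: alternative).

-- ===== PORT A =====
def update_array (arr : List Int) (num : Int) : List Int :=
  let updated_arr : List Int :=
    arr.foldl (fun acc element =>
      if PySem.Int.mod element 2 = 0 then acc ++ [element + num] else acc ++ [element]) []
  let deduped : List Int := PySem.Set.ofList updated_arr   -- list(set(updated_arr))
  PySem.List.sorted deduped (fun x => x) false             -- .sort()

-- ===== PORT B =====
-- Source B's merge: two-pointer merge of sorted duplicate-free lists, collapsing duplicates
def mergeDedup : List Int → List Int → List Int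
  | [], b => b                                   -- r.extend(b[j:])
  | a :: as_, [] => a :: as_                     -- r.extend(a[i:])
  | a :: as_, b :: bs =>
      if a < b then a :: mergeDedup as_ (b :: bs)
      else if b < a then b :: mergeDedup (a :: as_) bs
      else a :: mergeDedup as_ bs
termination_by a b => a.length + b.length

-- Source B's msort: split at len//2, recurse, merge
def msortD (l : List Int) : List Int :=
  if l.length ≤ 1 then l
  else
    let m : Nat := l.length / 2
    mergeDedup (msortD (PySem.List.slice l none (some (m : Int))))     -- l[:m]
               (msortD (PySem.List.slice l (some (m : Int)) none))     -- l[m:]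
termination_by l.length
decreasing_by
  · rw [PySem.List.slice_to_natCast]; simp; omega
  · rw [PySem.List.slice_from_natCast]; simp; omega

def update_array_alt (arr : List Int) (num : Int) : List Int :=
  msortD (arr.map (fun x => if PySem.Int.mod x 2 = 0 then x + num else x))

-- ===== PRECONDITION & SPEC =====
def Spec_update_array (arr : List Int) (num : Int) (out : List Int) : Prop := out = update_array_alt arr num
instance (arr : List Int) (num : Int) (out : List Int) : Decidable (Spec_update_array arr num out) := by unfold Spec_update_array; infer_instance

-- ===== CLAIM (what is proved, stated in full; the proofs are below) =====
def Claim_equal_update_array : Prop := ∀ (arr : List Int) (num : Int), Dom_update_array arr num → Spec_update_array arr num (update_array arr num)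

-- ===== LEMMAS AND PROOFS =====

-- A's append loop builds exactly the mapped list
theorem foldlA_eq_map (arr : List Int) (num : Int) :
    arr.foldl (fun acc element =>
      if PySem.Int.mod element 2 = 0 then acc ++ [element + num] else acc ++ [element]) []
    = arr.map (fun x => if PySem.Int.mod x 2 = 0 then x + num else x) := by
  have h : (fun (acc : List Int) (element : Int) =>
      if PySem.Int.mod element 2 = 0 then acc ++ [element + num] else acc ++ [element])
      = fun acc element => acc ++ [if PySem.Int.mod element 2 = 0 then element + num else element] := by
    funext acc e; split_ifs <;> rfl
  rw [h, PySem.List.foldl_append_singleton_eq_map]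
  simp

theorem mem_mergeDedup (a b : List Int) (x : Int) :
    x ∈ mergeDedup a b ↔ x ∈ a ∨ x ∈ b := by
  fun_induction mergeDedup a b with
  | case5 a as_ b bs hab hba ih =>
    have heq : a = b := le_antisymm (not_lt.mp hba) (not_lt.mp hab)
    subst heq
    simp_all; tauto
  | _ => simp_all <;> tauto

theorem pairwise_mergeDedup (a b : List Int)
    (ha : a.Pairwise (· < ·)) (hb : b.Pairwise (· < ·)) :
    (mergeDedup a b).Pairwise (· < ·) := by
  fun_induction mergeDedup a b with
  | case1 b => exact hb
  | case2 a as_ => exact ha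
  | case3 a as_ b bs hab ih =>
    rcases List.pairwise_cons.mp ha with ⟨ha1, ha2⟩
    refine List.pairwise_cons.mpr ⟨?_, ih ha2 hb⟩
    intro y hy
    rw [mem_mergeDedup] at hy
    rcases hy with hy | hy
    · exact ha1 y hy
    · rcases List.mem_cons.mp hy with rfl | hy
      · exact hab
      · exact lt_trans hab ((List.pairwise_cons.mp hb).1 y hy)
  | case4 a as_ b bs hab hba ih =>
    rcases List.pairwise_cons.mp hb with ⟨hb1, hb2⟩
    refine List.pairwise_cons.mpr ⟨?_, ih ha hb2⟩
    intro y hy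
    rw [mem_mergeDedup] at hy
    rcases hy with hy | hy
    · rcases List.mem_cons.mp hy with rfl | hy
      · exact hba
      · exact lt_trans hba ((List.pairwise_cons.mp ha).1 y hy)
    · exact hb1 y hy
  | case5 a as_ b bs hab hba ih =>
    have heq : a = b := le_antisymm (not_lt.mp hba) (not_lt.mp hab)
    rcases List.pairwise_cons.mp ha with ⟨ha1, ha2⟩
    rcases List.pairwise_cons.mp hb with ⟨hb1, hb2⟩
    refine List.pairwise_cons.mpr ⟨?_, ih ha2 hb2⟩
    intro y hy
    rw [mem_mergeDedup] at hy
    rcases hy with hy | hy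
    · exact ha1 y hy
    · exact heq ▸ hb1 y hy

theorem msortD_props (l : List Int) :
    (msortD l).Pairwise (· < ·) ∧ ∀ x, x ∈ msortD l ↔ x ∈ l := by
  fun_induction msortD l with
  | case1 l h =>
    match l, h with
    | [], _ => exact ⟨by simp, by simp⟩
    | [a], _ => exact ⟨by simp, by simp⟩
  | case2 l h m ih1 ih2 =>
    simp only [PySem.List.slice_to_natCast, PySem.List.slice_from_natCast] at ih1 ih2 ⊢
    refine ⟨pairwise_mergeDedup _ _ ih1.1 ih2.1, fun x => ?_⟩
    rw [mem_mergeDedup, ih1.2 x, ih2.2 x]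
    conv_rhs => rw [← List.take_append_drop m l]
    exact (List.mem_append).symm

-- ===== VERDICT (by name: the statement is the Claim_ definition above) =====
theorem update_array_spec : Claim_equal_update_array := by
  intro arr num _
  show update_array arr num = update_array_alt arr num
  unfold update_array update_array_alt
  simp only [foldlA_eq_map]
  set L := arr.map (fun x => if PySem.Int.mod x 2 = 0 then x + num else x) with hL
  obtain ⟨r1, r2⟩ := msortD_props L
  have hperm : (msortD L).Perm (PySem.Set.ofList L) := by
    have hnd : (msortD L).Nodup := r1.imp (fun h => ne_of_lt h)
    rw [List.perm_ext_iff_of_nodup hnd (PySem.Set.nodup_ofList _)]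
    intro x
    rw [r2 x, PySem.Set.mem_ofList]
  exact PySem.List.sorted_eq_of_perm_of_pairwise_lt _ _ _ hperm r1
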